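-- pv_equiv track=rewrite | github.com/Karapsin/Yandex_algo_training | HA5/H_test.py | slow_sol
-- ===== SOURCE A (Python) =====
-- def dict_from_str(input_str):
--     my_dict = dict()
--     for char in input_str:
--         if char not in my_dict:
--             my_dict[char] = 0
--         my_dict[char] = my_dict[char] + 1
--
--     return my_dict
--
-- def get_dict_max_val(dict):
--     max_val = -1
--     for key in dict:
--         if dict[key] > max_val:
--             max_val = dict[key]
--
--     return max_val
--
-- def slow_sol(input_str, k, n):
--     best_res = -1
--     best_res_start = -1
--     for i in range(len(input_str)):
--         for j in range(i+1, len(input_str)):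
--             new_str = input_str[i:(j+1)]
--             str_dict = dict_from_str(new_str)
--
--             if get_dict_max_val(str_dict)<=k and ((j+1)-i)>best_res:
--                 best_res = j + 1 - i
--                 best_res_start = i + 1
--
--     if best_res == -1:
--         best_res = n
--         best_res_start = 1
--
--
--     return (best_res, best_res_start)
-- ===== SOURCE B (Python) =====
-- def slow_sol(input_str, k, n):
--     L = len(input_str)
--     best, start = -1, -1
--     for i in range(L):
--         cnt = {}
--         m = 0
--         for c in input_str[i:]:
--             cnt[c] = cnt.get(c, 0) + 1
--             if cnt[c] > k:
--                 break
--             m += 1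
--         if m >= 2 and m > best:
--             best, start = m, i + 1
--     if best == -1:
--         best, start = n, 1
--     return (best, start)
-- ===== Notes on version B (the rewrite author's own statement) =====
-- stated objective: faster
-- what changed: A rebuilds a frequency dict and scans it for every (start,end) substring pair (cubic); B makes, per start index, a single incremental left-to-right extension with one running counter that stops at the first character whose count would exceed k (quadratic).
import Mathlib
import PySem

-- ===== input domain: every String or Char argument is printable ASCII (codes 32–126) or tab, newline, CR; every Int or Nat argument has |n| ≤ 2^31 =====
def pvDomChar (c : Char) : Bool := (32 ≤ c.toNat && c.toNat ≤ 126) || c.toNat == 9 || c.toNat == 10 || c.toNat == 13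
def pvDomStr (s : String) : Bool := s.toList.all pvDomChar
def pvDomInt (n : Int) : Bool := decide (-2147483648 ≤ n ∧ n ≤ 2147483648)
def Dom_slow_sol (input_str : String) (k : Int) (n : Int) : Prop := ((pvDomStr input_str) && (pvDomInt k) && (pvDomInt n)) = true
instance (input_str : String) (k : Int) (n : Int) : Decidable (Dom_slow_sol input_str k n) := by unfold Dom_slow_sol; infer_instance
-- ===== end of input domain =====

-- B replaces A's cubic scan over all substrings (rebuilding a frequency dict per substring)
-- by, for each start, one incremental left-to-right extension that stops at the first
-- violating character; objective: faster (removes one whole pass level).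

-- ===== PORT A =====
def dictFromStr (l : List Char) : PySem.Dict Char Int :=
  l.foldl (fun d c =>
    let d := if d.contains c then d else d.insert c 0
    d.insert c (d.getD c 0 + 1)) PySem.Dict.empty

def getDictMaxVal (d : PySem.Dict Char Int) : Int :=
  d.keys.foldl (fun mx key => if d.getD key 0 > mx then d.getD key 0 else mx) (-1)

def slow_sol (input_str : String) (k : Int) (n : Int) : List Int :=
  let l := input_str.toList
  let st := (PySem.List.pyRange 0 (PySem.Str.len input_str) 1).foldl (fun (bs : Int × Int) i =>
    (PySem.List.pyRange (i + 1) (PySem.Str.len input_str) 1).foldl (fun (bs : Int × Int) j =>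
      let new_str := PySem.List.slice l (some i) (some (j + 1))
      let str_dict := dictFromStr new_str
      if getDictMaxVal str_dict ≤ k ∧ (j + 1) - i > bs.1 then ((j + 1) - i, i + 1) else bs) bs)
    (-1, -1)
  let st := if st.1 = -1 then (n, (1 : Int)) else st
  [st.1, st.2]

-- ===== PORT B =====
-- inner 'for c in input_str[i:]: … break …' loop of Source B: returns the number m of
-- characters consumed before the first one whose incremented count exceeds k
def extendLen (k : Int) : List Char → PySem.Dict Char Int → Int
  | [], _ => 0
  | c :: rest, cnt =>
    let cnt := cnt.insert c (cnt.getD c 0 + 1)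
    if cnt.getD c 0 > k then 0 else extendLen k rest cnt + 1

def slow_sol_alt (input_str : String) (k : Int) (n : Int) : List Int :=
  let l := input_str.toList
  let st := (PySem.List.pyRange 0 (PySem.Str.len input_str) 1).foldl (fun (bs : Int × Int) i =>
    let m := extendLen k (PySem.List.slice l (some i) none) PySem.Dict.empty
    if 2 ≤ m ∧ m > bs.1 then (m, i + 1) else bs) (-1, -1)
  let st := if st.1 = -1 then (n, (1 : Int)) else st
  [st.1, st.2]

-- ===== PRECONDITION & SPEC =====
def Spec_slow_sol (input_str : String) (k : Int) (n : Int) (out : List Int) : Prop := out = slow_sol_alt input_str k n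
instance (input_str : String) (k : Int) (n : Int) (out : List Int) : Decidable (Spec_slow_sol input_str k n out) := by unfold Spec_slow_sol; infer_instance

-- ===== CLAIM (what is proved, stated in full; the proofs are below) =====
def Claim_equal_slow_sol : Prop := ∀ (input_str : String) (k : Int) (n : Int), Dom_slow_sol input_str k n → Spec_slow_sol input_str k n (slow_sol input_str k n)

-- ===== LEMMAS AND PROOFS =====

theorem dfs_aux (l : List Char) : ∀ (pre : List Char) (d : PySem.Dict Char Int),
    (∀ c, d.getD c 0 = pre.count c) → (∀ c, d.contains c = true ↔ c ∈ pre) →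
    (∀ c, (l.foldl (fun d c =>
        let d := if d.contains c then d else d.insert c 0
        d.insert c (d.getD c 0 + 1)) d).getD c 0 = ((pre ++ l).count c : Int)) ∧
    (∀ c, (l.foldl (fun d c =>
        let d := if d.contains c then d else d.insert c 0
        d.insert c (d.getD c 0 + 1)) d).contains c = true ↔ c ∈ pre ++ l) := by
  induction l with
  | nil => intro pre d h1 h2; simpa using ⟨h1, h2⟩
  | cons a l ih =>
    intro pre d h1 h2
    simp only [List.foldl_cons]
    have hd1g : ∀ c, (if d.contains a then d else d.insert a 0).getD c 0 = (pre.count c : Int) := by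
      intro c
      by_cases hca : d.contains a = true
      · rw [if_pos hca]; exact h1 c
      · rw [if_neg hca]
        by_cases hc : c = a
        · subst hc
          have : c ∉ pre := fun h => hca ((h2 c).mpr h)
          simp [PySem.Dict.getD_insert_self, List.count_eq_zero.mpr this]
        · rw [PySem.Dict.getD_insert_of_ne _ _ _ hc, h1]
    have hd1c : ∀ c, (if d.contains a then d else d.insert a 0).contains c = true ↔ (c ∈ pre ∨ c = a) := by
      intro c
      by_cases hca : d.contains a = true
      · rw [if_pos hca]
        constructor
        · intro h; exact Or.inl ((h2 c).mp h)
        · rintro (h | rfl)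
          · exact (h2 c).mpr h
          · exact hca
      · rw [if_neg hca]
        simp only [PySem.Dict.contains_insert, Bool.or_eq_true, beq_iff_eq]
        rw [h2]; tauto
    set d1 := if d.contains a then d else d.insert a 0 with hd1
    have h1' : ∀ c, (d1.insert a (d1.getD a 0 + 1)).getD c 0 = ((pre ++ [a]).count c : Int) := by
      intro c
      by_cases hc : c = a
      · subst hc
        simp [PySem.Dict.getD_insert_self, hd1g, List.count_append]
      · rw [PySem.Dict.getD_insert_of_ne _ _ _ hc, hd1g]
        simp [List.count_append, Ne.symm hc]
    have h2' : ∀ c, (d1.insert a (d1.getD a 0 + 1)).contains c = true ↔ c ∈ pre ++ [a] := by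
      intro c
      simp only [PySem.Dict.contains_insert, Bool.or_eq_true, beq_iff_eq, hd1c, List.mem_append,
        List.mem_singleton]
      tauto
    have := ih (pre ++ [a]) _ h1' h2'
    simpa using this

theorem dictFromStr_getD (l : List Char) (c : Char) :
    (dictFromStr l).getD c 0 = (l.count c : Int) := by
  have := (dfs_aux l [] PySem.Dict.empty (by intro c; rfl) (by intro c; simp)).1 c
  simpa [dictFromStr] using this

theorem dictFromStr_keys (l : List Char) (c : Char) :
    c ∈ (dictFromStr l).keys ↔ c ∈ l := by
  rw [← PySem.Dict.contains_iff_mem_keys]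
  have := (dfs_aux l [] PySem.Dict.empty (by intro c; rfl) (by intro c; simp)).2 c
  simpa [dictFromStr] using this

theorem foldl_max_le (g : Char → Int) (xs : List Char) :
    ∀ a k : Int, (xs.foldl (fun mx x => if g x > mx then g x else mx) a ≤ k ↔
      a ≤ k ∧ ∀ x ∈ xs, g x ≤ k) := by
  induction xs with
  | nil => intro a k; simp
  | cons x xs ih =>
    intro a k
    simp only [List.foldl_cons, ih, List.mem_cons]
    split_ifs with h
    · constructor
      · rintro ⟨h1, h2⟩
        exact ⟨by omega, fun y hy => by rcases hy with rfl | hy; exacts [h1, h2 y hy]⟩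
      · rintro ⟨h1, h2⟩
        exact ⟨h2 x (Or.inl rfl), fun y hy => h2 y (Or.inr hy)⟩
    · constructor
      · rintro ⟨h1, h2⟩
        exact ⟨h1, fun y hy => by rcases hy with rfl | hy; exacts [by omega, h2 y hy]⟩
      · rintro ⟨h1, h2⟩
        exact ⟨h1, fun y hy => h2 y (Or.inr hy)⟩

theorem maxVal_le_iff (t : List Char) (k : Int) (ht : t ≠ []) :
    (getDictMaxVal (dictFromStr t) ≤ k ↔ ∀ c ∈ t, (t.count c : Int) ≤ k) := by
  unfold getDictMaxVal
  rw [foldl_max_le]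
  constructor
  · rintro ⟨_, h⟩ c hc
    have := h c ((dictFromStr_keys t c).mpr hc)
    rwa [dictFromStr_getD] at this
  · intro h
    obtain ⟨c, hc⟩ := List.exists_mem_of_ne_nil t ht
    have hk : (1 : Int) ≤ k := by
      have h1 := h c hc
      have : 0 < t.count c := List.count_pos_iff.mpr hc
      omega
    refine ⟨by omega, fun x hx => ?_⟩
    rw [dictFromStr_getD]
    exact h x ((dictFromStr_keys t x).mp hx)

theorem extendLen_nonneg (k : Int) (t : List Char) (d : PySem.Dict Char Int) :
    0 ≤ extendLen k t d := by
  induction t generalizing d with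
  | nil => simp [extendLen]
  | cons c rest ih =>
    simp only [extendLen]
    split
    · omega
    · have := ih (d.insert c (d.getD c 0 + 1)); omega

theorem extendLen_le_len (k : Int) (t : List Char) (d : PySem.Dict Char Int) :
    extendLen k t d ≤ (t.length : Int) := by
  induction t generalizing d with
  | nil => simp [extendLen]
  | cons c rest ih =>
    simp only [extendLen, List.length_cons]
    split
    · push_cast; omega
    · have := ih (d.insert c (d.getD c 0 + 1)); push_cast; omega

theorem ext_iff (k : Int) (t : List Char) :
    ∀ (pre : List Char) (d : PySem.Dict Char Int),
    (∀ c ∈ pre, (pre.count c : Int) ≤ k) →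
    (∀ c, d.getD c 0 = (pre.count c : Int)) →
    ∀ (m : Nat), m ≤ t.length →
    ((∀ c ∈ pre ++ t.take m, (((pre ++ t.take m).count c : Int)) ≤ k) ↔
      (m : Int) ≤ extendLen k t d) := by
  induction t with
  | nil =>
    intro pre d hpre hd m hm
    have hm0 : m = 0 := by simpa using hm
    subst hm0
    simp only [List.take_nil, List.append_nil, extendLen, Nat.cast_zero, le_refl, iff_true]
    exact hpre
  | cons c rest ih =>
    intro pre d hpre hd m hm
    simp only [extendLen]
    have hd' : ∀ x, (d.insert c (d.getD c 0 + 1)).getD x 0 = (((pre ++ [c]).count x : Int)) := by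
      intro x
      by_cases hx : x = c
      · subst hx
        rw [PySem.Dict.getD_insert_self, hd]
        simp [List.count_append]
      · rw [PySem.Dict.getD_insert_of_ne _ _ _ hx, hd]
        simp [List.count_append, Ne.symm hx]
    by_cases hbr : (d.insert c (d.getD c 0 + 1)).getD c 0 > k
    · rw [if_pos hbr]
      rw [hd'] at hbr
      cases m with
      | zero =>
        simp only [List.take_zero, List.append_nil, Nat.cast_zero, le_refl, iff_true]
        exact hpre
      | succ m' =>
        apply iff_of_false
        · intro h
          have hc := h c (by simp)
          rw [List.take_succ_cons] at hc
          have hcount : (pre ++ c :: rest.take m').count c =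
              pre.count c + ((rest.take m').count c + 1) := by
            simp [List.count_append, List.count_cons_self]
          rw [hcount] at hc
          have hb2 : ((pre.count c : Int)) + 1 > k := by
            simpa [List.count_append] using hbr
          push_cast at hc
          omega
        · push_cast; omega
    · rw [if_neg hbr]
      rw [hd'] at hbr
      have hpre' : ∀ x ∈ pre ++ [c], ((pre ++ [c]).count x : Int) ≤ k := by
        intro x hx
        by_cases hxc : x = c
        · subst hxc; omega
        · have hxp : x ∈ pre := by
            rcases List.mem_append.mp hx with h | h
            · exact h
            · simp at h; exact absurd h hxc
          have : (pre ++ [c]).count x = pre.count x := by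
            simp [List.count_append, Ne.symm hxc]
          rw [this]
          exact hpre x hxp
      cases m with
      | zero =>
        apply iff_of_true
        · simpa using hpre
        · have := extendLen_nonneg k rest (d.insert c (d.getD c 0 + 1))
          push_cast; omega
      | succ m' =>
        have hm' : m' ≤ rest.length := by simpa using hm
        have hIH := ih (pre ++ [c]) (d.insert c (d.getD c 0 + 1)) hpre' hd' m' hm'
        rw [List.take_succ_cons]
        rw [show pre ++ c :: rest.take m' = (pre ++ [c]) ++ rest.take m' by simp]
        rw [hIH]
        push_cast
        omega

theorem inner_collapse (i m b : Int) (hmb : m + i ≤ b) :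
    ∀ (n : Nat) (a best start : Int), (b - a).toNat = n →
      ((PySem.List.pyRange a b 1).foldl
        (fun (bs : Int × Int) j => if (j + 1) - i ≤ m ∧ (j + 1) - i > bs.1 then ((j + 1) - i, i + 1) else bs)
        (best, start)) =
      (if a + 1 - i ≤ m ∧ m > best then (m, i + 1) else (best, start)) := by
  intro n
  induction n with
  | zero =>
    intro a best start hn
    have hba : b ≤ a := by omega
    rw [PySem.List.pyRange_one_eq_nil hba]
    simp only [List.foldl_nil]
    rw [if_neg (by omega)]
  | succ n ih =>
    intro a best start hn
    have hab : a < b := by omega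
    rw [PySem.List.pyRange_one_cons hab, List.foldl_cons]
    dsimp only
    by_cases h : (a + 1) - i ≤ m ∧ (a + 1) - i > best
    · rw [if_pos h]
      rw [ih (a + 1) ((a + 1) - i) (i + 1) (by omega)]
      rw [if_pos (show a + 1 - i ≤ m ∧ m > best by omega)]
      split_ifs with h2
      · rfl
      · have hm' : m = (a + 1) - i := by omega
        rw [hm']
    · rw [if_neg h]
      rw [ih (a + 1) best start (by omega)]
      split_ifs with h1 h2
      · rfl
      · exfalso; omega
      · exfalso; omega
      · rfl

-- ===== VERDICT (by name: the statement is the Claim_ definition above) =====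
theorem slow_sol_spec : Claim_equal_slow_sol := by
  intro s k n _
  unfold Spec_slow_sol slow_sol slow_sol_alt
  simp only [PySem.Str.len_eq]
  have houter : ∀ (acc : Int × Int), ∀ i ∈ PySem.List.pyRange 0 ((s.toList.length : Nat) : Int) 1,
      ((PySem.List.pyRange (i + 1) ((s.toList.length : Nat) : Int) 1).foldl (fun (bs : Int × Int) j =>
        let new_str := PySem.List.slice s.toList (some i) (some (j + 1))
        let str_dict := dictFromStr new_str
        if getDictMaxVal str_dict ≤ k ∧ (j + 1) - i > bs.1 then ((j + 1) - i, i + 1) else bs) acc) =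
      (let m := extendLen k (PySem.List.slice s.toList (some i) none) PySem.Dict.empty
       if 2 ≤ m ∧ m > acc.1 then (m, i + 1) else acc) := by
    intro acc i hi
    obtain ⟨b0, s0⟩ := acc
    rw [PySem.List.mem_pyRange_one] at hi
    obtain ⟨hi0, hiL⟩ := hi
    rw [PySem.List.slice_from s.toList hi0]
    have hstep : ∀ (bs : Int × Int), ∀ j ∈ PySem.List.pyRange (i + 1) ((s.toList.length : Nat) : Int) 1,
        (let new_str := PySem.List.slice s.toList (some i) (some (j + 1))
         let str_dict := dictFromStr new_str
         if getDictMaxVal str_dict ≤ k ∧ (j + 1) - i > bs.1 then ((j + 1) - i, i + 1) else bs) =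
        (if (j + 1) - i ≤ extendLen k (s.toList.drop i.toNat) PySem.Dict.empty ∧ (j + 1) - i > bs.1
         then ((j + 1) - i, i + 1) else bs) := by
      intro bs j hj
      rw [PySem.List.mem_pyRange_one] at hj
      obtain ⟨hj1, hjL⟩ := hj
      have hsub : PySem.List.slice s.toList (some i) (some (j + 1)) =
          (s.toList.drop i.toNat).take ((j + 1 - i).toNat) := by
        rw [PySem.List.slice_toNat s.toList hi0 (by omega)]
        congr 1
        omega
      have hlen : (j + 1 - i).toNat ≤ (s.toList.drop i.toNat).length := by
        rw [List.length_drop]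
        omega
      have hne : (s.toList.drop i.toNat).take ((j + 1 - i).toNat) ≠ [] := by
        intro hnil
        have := congrArg List.length hnil
        simp only [List.length_take, List.length_nil] at this
        omega
      have hiff : getDictMaxVal (dictFromStr (PySem.List.slice s.toList (some i) (some (j + 1)))) ≤ k ↔
          (j + 1) - i ≤ extendLen k (s.toList.drop i.toNat) PySem.Dict.empty := by
        rw [hsub, maxVal_le_iff _ k hne]
        have hext := ext_iff k (s.toList.drop i.toNat) [] PySem.Dict.empty (by simp)
          (fun c => rfl) ((j + 1 - i).toNat) hlen
        simp only [List.nil_append] at hext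
        rw [hext, Int.toNat_of_nonneg (by omega : (0:Int) ≤ j + 1 - i)]
      exact if_congr (and_congr hiff Iff.rfl) rfl rfl
    rw [PySem.List.foldl_congr_mem _ _ _ _ hstep]
    have hEle := extendLen_le_len k (s.toList.drop i.toNat) PySem.Dict.empty
    rw [List.length_drop] at hEle
    rw [inner_collapse i (extendLen k (s.toList.drop i.toNat) PySem.Dict.empty)
      ((s.toList.length : Nat) : Int) (by omega)
      (((s.toList.length : Nat) : Int) - (i + 1)).toNat (i + 1) b0 s0 rfl]
    exact if_congr (by omega) rfl rfl
  rw [PySem.List.foldl_congr_mem _ _ _ _ houter]
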